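-- pv_equiv track=rewrite | github.com/premporiya/KiddoLand-Platform-API | services/learning_activity_service.py | _learning_goal_guidance
-- ===== SOURCE A (Python) =====
-- def _learning_goal_guidance(learning_goal: str) -> str:
--     """Return extra prompt instructions tailored to the requested learning goal."""
--     goal = learning_goal.lower().strip()
--
--     if any(k in goal for k in ("count", "number", "math", "addition", "subtraction", "arithmetic")):
--         return (
--             "Learning goal is COUNTING / NUMBERS: "
--             "Every question must be a short word-problem or counting scenario set inside the theme — "
--             "NOT a trivia fact (e.g. do NOT ask 'how many moons does Saturn have'). "
--             "Instead write scenarios like: 'There are 4 stars on the left and 3 on the right. "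
--             "How many stars are there in total?' "
--             "Answer options MUST be plain numbers (e.g. '3', '7', '12'). "
--             "Keep numbers small and age-appropriate. "
--             "Vary the operations: some questions can be addition, some can be simple subtraction or comparison."
--         )
--
--     if any(k in goal for k in ("vocab", "word", "spelling", "language", "letters")):
--         return (
--             "Learning goal is VOCABULARY / WORDS: "
--             "Ask about word meanings, correct naming of things in the theme, completing sentences, "
--             "or identifying which word fits a description. "
--             "Options should be short words or phrases, not full sentences."
--         )
--
--     if any(k in goal for k in ("science", "nature", "biology", "physics", "chemistry", "planet", "animal")):
--         return (
--             "Learning goal is SCIENCE FACTS: "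
--             "Ask simple, factual science questions related to the theme. "
--             "Each question should have one clearly correct answer a child can learn from. "
--             "Keep explanations friendly and educational."
--         )
--
--     if any(k in goal for k in ("geo", "country", "continent", "map", "capital", "place")):
--         return (
--             "Learning goal is GEOGRAPHY: "
--             "Ask about places, countries, continents, or simple map facts connected to the theme. "
--             "Options should be place names or short geographic facts."
--         )
--
--     if any(k in goal for k in ("read", "comprehension", "story", "sentence", "paragraph")):
--         return (
--             "Learning goal is READING COMPREHENSION: "
--             "Each question should give a short 1-2 sentence mini-passage and then ask a question about it. "
--             "Test understanding, not memorization."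
--         )
--
--     if any(k in goal for k in ("color", "colour", "shape", "pattern", "size")):
--         return (
--             "Learning goal is SHAPES / COLORS: "
--             "Ask questions about identifying shapes, colors, or visual patterns described in words. "
--             "Keep descriptions vivid and imaginative within the theme."
--         )
--
--     if any(k in goal for k in ("emotion", "feeling", "social", "friend", "kind", "share", "team")):
--         return (
--             "Learning goal is SOCIAL / EMOTIONAL: "
--             "Ask questions about feelings, how to be a good friend, problem-solving in social situations, "
--             "or what the right kind action would be in a described scenario."
--         )
--
--     # Generic fallback — no special shaping needed
--     return ""
-- ===== SOURCE B (Python) =====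
-- # Dictionary-matching scan: walk the goal text once; at each position look up the
-- # candidate-length slices in a keyword -> group-index hash map and keep the minimum
-- # group index matched; return that group's guidance text ("" if nothing matched).
-- _T0 = (
--     "Learning goal is COUNTING / NUMBERS: "
--     "Every question must be a short word-problem or counting scenario set inside the theme — "
--     "NOT a trivia fact (e.g. do NOT ask 'how many moons does Saturn have'). "
--     "Instead write scenarios like: 'There are 4 stars on the left and 3 on the right. "
--     "How many stars are there in total?' "
--     "Answer options MUST be plain numbers (e.g. '3', '7', '12'). "
--     "Keep numbers small and age-appropriate. "
--     "Vary the operations: some questions can be addition, some can be simple subtraction or comparison."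
-- )
-- _T1 = (
--     "Learning goal is VOCABULARY / WORDS: "
--     "Ask about word meanings, correct naming of things in the theme, completing sentences, "
--     "or identifying which word fits a description. "
--     "Options should be short words or phrases, not full sentences."
-- )
-- _T2 = (
--     "Learning goal is SCIENCE FACTS: "
--     "Ask simple, factual science questions related to the theme. "
--     "Each question should have one clearly correct answer a child can learn from. "
--     "Keep explanations friendly and educational."
-- )
-- _T3 = (
--     "Learning goal is GEOGRAPHY: "
--     "Ask about places, countries, continents, or simple map facts connected to the theme. "
--     "Options should be place names or short geographic facts."
-- )
-- _T4 = (
--     "Learning goal is READING COMPREHENSION: "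
--     "Each question should give a short 1-2 sentence mini-passage and then ask a question about it. "
--     "Test understanding, not memorization."
-- )
-- _T5 = (
--     "Learning goal is SHAPES / COLORS: "
--     "Ask questions about identifying shapes, colors, or visual patterns described in words. "
--     "Keep descriptions vivid and imaginative within the theme."
-- )
-- _T6 = (
--     "Learning goal is SOCIAL / EMOTIONAL: "
--     "Ask questions about feelings, how to be a good friend, problem-solving in social situations, "
--     "or what the right kind action would be in a described scenario."
-- )
-- _TEXTS = [_T0, _T1, _T2, _T3, _T4, _T5, _T6]
--
-- # keyword -> index of its guidance group (groups in the priority order of the original cascade)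
-- _KW_INDEX = {
--     "count": 0, "number": 0, "math": 0, "addition": 0, "subtraction": 0, "arithmetic": 0,
--     "vocab": 1, "word": 1, "spelling": 1, "language": 1, "letters": 1,
--     "science": 2, "nature": 2, "biology": 2, "physics": 2, "chemistry": 2, "planet": 2, "animal": 2,
--     "geo": 3, "country": 3, "continent": 3, "map": 3, "capital": 3, "place": 3,
--     "read": 4, "comprehension": 4, "story": 4, "sentence": 4, "paragraph": 4,
--     "color": 5, "colour": 5, "shape": 5, "pattern": 5, "size": 5,
--     "emotion": 6, "feeling": 6, "social": 6, "friend": 6, "kind": 6, "share": 6, "team": 6,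
-- }
--
-- # the distinct keyword lengths
-- _KW_LENGTHS = (3, 4, 5, 6, 7, 8, 9, 10, 11, 13)
--
--
-- def _learning_goal_guidance(learning_goal: str) -> str:
--     goal = learning_goal.lower().strip()
--     best = None
--     for i in range(len(goal)):
--         for L in _KW_LENGTHS:
--             j = _KW_INDEX.get(goal[i:i + L])
--             if j is not None and (best is None or j < best):
--                 best = j
--     return _TEXTS[best] if best is not None else ""
-- ===== Notes on version B (the rewrite author's own statement) =====
-- stated objective: alternative
-- what changed: Replaces A's per-keyword substring searches in an if-cascade by a dictionary-matching scan: one pass over the goal's positions, hashing each candidate-length slice into a keyword-to-group-index map and keeping the minimum group index, whose text is returned.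
import Mathlib
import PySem

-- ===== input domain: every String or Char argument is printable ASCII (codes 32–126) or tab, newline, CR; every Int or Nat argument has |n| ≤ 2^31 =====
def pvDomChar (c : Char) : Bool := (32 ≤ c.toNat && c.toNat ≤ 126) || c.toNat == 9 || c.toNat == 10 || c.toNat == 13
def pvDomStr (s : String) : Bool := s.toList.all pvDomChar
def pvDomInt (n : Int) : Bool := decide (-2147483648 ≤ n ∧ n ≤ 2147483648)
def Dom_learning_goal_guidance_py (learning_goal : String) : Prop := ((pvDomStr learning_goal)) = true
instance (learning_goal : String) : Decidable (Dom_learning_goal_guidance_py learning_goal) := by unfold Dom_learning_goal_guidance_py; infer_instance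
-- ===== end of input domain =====

-- B replaces A's per-keyword substring-search cascade by a dictionary-matching scan:
-- one pass over the goal's positions, hashing each candidate-length slice into a
-- keyword→group-index map and keeping the minimum group index matched.

-- ===== PORT A =====
def learning_goal_guidance_py (learning_goal : String) : String :=
  let goal := PySem.Str.strip (PySem.Str.lower learning_goal)
  if ["count", "number", "math", "addition", "subtraction", "arithmetic"].any (fun k => PySem.Str.isIn k goal) then
    "Learning goal is COUNTING / NUMBERS: Every question must be a short word-problem or counting scenario set inside the theme — NOT a trivia fact (e.g. do NOT ask 'how many moons does Saturn have'). Instead write scenarios like: 'There are 4 stars on the left and 3 on the right. How many stars are there in total?' Answer options MUST be plain numbers (e.g. '3', '7', '12'). Keep numbers small and age-appropriate. Vary the operations: some questions can be addition, some can be simple subtraction or comparison."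
  else
  if ["vocab", "word", "spelling", "language", "letters"].any (fun k => PySem.Str.isIn k goal) then
    "Learning goal is VOCABULARY / WORDS: Ask about word meanings, correct naming of things in the theme, completing sentences, or identifying which word fits a description. Options should be short words or phrases, not full sentences."
  else
  if ["science", "nature", "biology", "physics", "chemistry", "planet", "animal"].any (fun k => PySem.Str.isIn k goal) then
    "Learning goal is SCIENCE FACTS: Ask simple, factual science questions related to the theme. Each question should have one clearly correct answer a child can learn from. Keep explanations friendly and educational."
  else
  if ["geo", "country", "continent", "map", "capital", "place"].any (fun k => PySem.Str.isIn k goal) then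
    "Learning goal is GEOGRAPHY: Ask about places, countries, continents, or simple map facts connected to the theme. Options should be place names or short geographic facts."
  else
  if ["read", "comprehension", "story", "sentence", "paragraph"].any (fun k => PySem.Str.isIn k goal) then
    "Learning goal is READING COMPREHENSION: Each question should give a short 1-2 sentence mini-passage and then ask a question about it. Test understanding, not memorization."
  else
  if ["color", "colour", "shape", "pattern", "size"].any (fun k => PySem.Str.isIn k goal) then
    "Learning goal is SHAPES / COLORS: Ask questions about identifying shapes, colors, or visual patterns described in words. Keep descriptions vivid and imaginative within the theme."
  else
  if ["emotion", "feeling", "social", "friend", "kind", "share", "team"].any (fun k => PySem.Str.isIn k goal) then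
    "Learning goal is SOCIAL / EMOTIONAL: Ask questions about feelings, how to be a good friend, problem-solving in social situations, or what the right kind action would be in a described scenario."
  else
  ""

-- ===== PORT B =====
-- _TEXTS
def guidanceTexts : List String :=
  [ "Learning goal is COUNTING / NUMBERS: Every question must be a short word-problem or counting scenario set inside the theme — NOT a trivia fact (e.g. do NOT ask 'how many moons does Saturn have'). Instead write scenarios like: 'There are 4 stars on the left and 3 on the right. How many stars are there in total?' Answer options MUST be plain numbers (e.g. '3', '7', '12'). Keep numbers small and age-appropriate. Vary the operations: some questions can be addition, some can be simple subtraction or comparison."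
  , "Learning goal is VOCABULARY / WORDS: Ask about word meanings, correct naming of things in the theme, completing sentences, or identifying which word fits a description. Options should be short words or phrases, not full sentences."
  , "Learning goal is SCIENCE FACTS: Ask simple, factual science questions related to the theme. Each question should have one clearly correct answer a child can learn from. Keep explanations friendly and educational."
  , "Learning goal is GEOGRAPHY: Ask about places, countries, continents, or simple map facts connected to the theme. Options should be place names or short geographic facts."
  , "Learning goal is READING COMPREHENSION: Each question should give a short 1-2 sentence mini-passage and then ask a question about it. Test understanding, not memorization."
  , "Learning goal is SHAPES / COLORS: Ask questions about identifying shapes, colors, or visual patterns described in words. Keep descriptions vivid and imaginative within the theme."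
  , "Learning goal is SOCIAL / EMOTIONAL: Ask questions about feelings, how to be a good friend, problem-solving in social situations, or what the right kind action would be in a described scenario." ]

-- _KW_INDEX (dict literal: keyword → index of its guidance group)
def kwPairs : List (String × Int) :=
  [ ("count", 0), ("number", 0), ("math", 0), ("addition", 0), ("subtraction", 0), ("arithmetic", 0)
  , ("vocab", 1), ("word", 1), ("spelling", 1), ("language", 1), ("letters", 1)
  , ("science", 2), ("nature", 2), ("biology", 2), ("physics", 2), ("chemistry", 2), ("planet", 2), ("animal", 2)
  , ("geo", 3), ("country", 3), ("continent", 3), ("map", 3), ("capital", 3), ("place", 3)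
  , ("read", 4), ("comprehension", 4), ("story", 4), ("sentence", 4), ("paragraph", 4)
  , ("color", 5), ("colour", 5), ("shape", 5), ("pattern", 5), ("size", 5)
  , ("emotion", 6), ("feeling", 6), ("social", 6), ("friend", 6), ("kind", 6), ("share", 6), ("team", 6) ]

def kwIndex : PySem.Dict String Int := PySem.Dict.ofList kwPairs

-- _KW_LENGTHS (the distinct keyword lengths)
def kwLengths : List Int := [3, 4, 5, 6, 7, 8, 9, 10, 11, 13]

def learning_goal_guidance_py_alt (learning_goal : String) : String :=
  let goal := PySem.Str.strip (PySem.Str.lower learning_goal)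
  let best :=
    (PySem.List.pyRange 0 (PySem.Str.len goal) 1).foldl
      (fun best i =>
        kwLengths.foldl
          (fun best L =>
            -- j = _KW_INDEX.get(goal[i:i+L]); if j is not None and (best is None or j < best): best = j
            match kwIndex.get? (PySem.Str.slice goal (some i) (some (i + L))), best with
            | some j, none => some j
            | some j, some b => if j < b then some j else some b
            | none, _ => best)
          best)
      none
  -- return _TEXTS[best] if best is not None else ""
  match best with
  | some b =>
    match PySem.List.pyGet? guidanceTexts b with
    | some t => t
    | none => ""   -- unreachable: best is always in [0, 7)
  | none => ""

-- ===== PRECONDITION & SPEC =====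
def Spec_learning_goal_guidance_py (learning_goal : String) (out : String) : Prop := out = learning_goal_guidance_py_alt learning_goal
instance (learning_goal : String) (out : String) : Decidable (Spec_learning_goal_guidance_py learning_goal out) := by unfold Spec_learning_goal_guidance_py; infer_instance

-- ===== CLAIM (what is proved, stated in full; the proofs are below) =====
def Claim_equal_learning_goal_guidance_py : Prop := ∀ (learning_goal : String), Dom_learning_goal_guidance_py learning_goal → Spec_learning_goal_guidance_py learning_goal (learning_goal_guidance_py learning_goal)

-- ===== LEMMAS AND PROOFS =====

-- the body of B's inner update, named for the proofs
def pvStep (best x : Option Int) : Option Int :=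
  match x, best with
  | some j, none => some j
  | some j, some b => if j < b then some j else some b
  | none, _ => best

-- option-valued minimum
def pvOmin : Option Int → Option Int → Option Int
  | none, y => y
  | x, none => x
  | some x, some y => some (min x y)

def pvLookup (g : String) (i L : Int) : Option Int :=
  kwIndex.get? (PySem.Str.slice g (some i) (some (i + L)))

def pvCands (g : String) : List (Option Int) :=
  (PySem.List.pyRange 0 (PySem.Str.len g) 1).flatMap (fun i => kwLengths.map (pvLookup g i))

-- group j has a keyword occurring in g
def pvMatched (j : Int) (g : String) : Prop :=
  ∃ kw, (kw, j) ∈ kwPairs ∧ kw.toList <:+: g.toList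

theorem pvStep_eq_omin (b x : Option Int) : pvStep b x = pvOmin b x := by
  cases b <;> cases x <;> try rfl
  rename_i b j
  show (if j < b then some j else some b) = some (min b j)
  split_ifs with h
  · rw [min_eq_right h.le]
  · rw [min_eq_left (by omega)]

theorem pvOmin_none (b : Option Int) : pvOmin b none = b := by cases b <;> rfl

theorem pvOmin_assoc (a b c : Option Int) : pvOmin (pvOmin a b) c = pvOmin a (pvOmin b c) := by
  cases a <;> cases b <;> cases c <;> simp [pvOmin, min_assoc]

theorem min?_cons_omin (j : Int) (l : List Int) : (j :: l).min? = pvOmin (some j) l.min? := by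
  rw [List.min?_cons]
  cases h : l.min? <;> simp [pvOmin, Option.elim]

theorem foldl_pvOmin (l : List (Option Int)) (b : Option Int) :
    l.foldl pvOmin b = pvOmin b (l.filterMap id).min? := by
  induction l generalizing b with
  | nil => simp [pvOmin_none]
  | cons x l ih =>
    cases x with
    | none =>
      rw [List.foldl_cons, pvOmin_none, ih, List.filterMap_cons_none (f := id) rfl]
    | some j =>
      rw [List.foldl_cons, ih, List.filterMap_cons_some (f := id) rfl,
        min?_cons_omin, ← pvOmin_assoc]

-- facts about the keyword table, verified by computation
set_option maxRecDepth 8192 in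
theorem pairs_facts : ∀ p ∈ kwPairs,
    p.1.toList ≠ [] ∧ ((p.1.toList.length : Int) ∈ kwLengths) ∧ kwIndex.get? p.1 = some p.2 ∧
      0 ≤ p.2 ∧ p.2 ≤ 6 := by decide

set_option maxRecDepth 8192 in
theorem items_kwIndex : kwIndex.items = kwPairs := by decide

theorem lengths_pos : ∀ L ∈ kwLengths, 0 < L := by decide

-- B's candidate values are exactly the matched group indices
theorem mem_vals_iff (g : String) (j : Int) :
    j ∈ (pvCands g).filterMap id ↔ pvMatched j g := by
  constructor
  · intro h
    simp only [List.mem_filterMap, id] at h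
    obtain ⟨o, ho, rfl⟩ := h
    simp only [pvCands, List.mem_flatMap, List.mem_map] at ho
    obtain ⟨i, hi, L, hL, hlook⟩ := ho
    have hi' := PySem.List.mem_pyRange_one.mp hi
    have hL' := lengths_pos L hL
    have hmem := PySem.Dict.mem_items_of_get?_eq_some _ hlook
    rw [items_kwIndex] at hmem
    refine ⟨_, hmem, ?_⟩
    rw [PySem.Str.toList_slice]
    show PySem.List.slice g.toList (some i) (some (i + L)) <:+: g.toList
    rw [PySem.List.slice_toNat g.toList (by omega) (by omega)]
    exact (List.take_prefix _ _).isInfix.trans (List.drop_suffix _ _).isInfix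
  · rintro ⟨kw, hmem, hinf⟩
    obtain ⟨s, t, hg⟩ := hinf
    obtain ⟨hne, hLmem, hget, -, -⟩ := pairs_facts _ hmem
    have hslice : PySem.Str.slice g (some (s.length : Int))
        (some ((s.length : Int) + (kw.toList.length : Int))) = kw := by
      rw [← String.toList_inj, PySem.Str.toList_slice]
      show PySem.List.slice g.toList _ _ = kw.toList
      rw [← Int.natCast_add, PySem.List.slice_natCast]
      rw [← hg, Nat.add_sub_cancel_left, List.append_assoc, List.drop_left,
        List.take_left]
    simp only [List.mem_filterMap, id]
    refine ⟨some j, ?_, rfl⟩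
    simp only [pvCands, List.mem_flatMap, List.mem_map]
    refine ⟨(s.length : Int), ?_, (kw.toList.length : Int), hLmem, ?_⟩
    · rw [PySem.List.mem_pyRange_one]
      have hlen : g.toList.length = s.length + kw.toList.length + t.length := by
        rw [← hg]; simp; omega
      have hkw : 0 < kw.toList.length := List.length_pos_iff.mpr hne
      constructor
      · omega
      · rw [PySem.Str.len_eq]; omega
    · rw [pvLookup, hslice, hget]

-- each cascade test of A is truth-equivalent to pvMatched of its group index
theorem group_iff (g : String) (ks : List String) (j : Int)
    (h1 : ∀ k ∈ ks, (k, j) ∈ kwPairs) (h2 : ∀ p ∈ kwPairs, p.2 = j → p.1 ∈ ks) :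
    (ks.any (fun k => PySem.Str.isIn k g) = true) ↔ pvMatched j g := by
  rw [List.any_eq_true]
  constructor
  · rintro ⟨k, hk, hin⟩
    exact ⟨k, h1 k hk, (PySem.Str.isIn_iff_infix k g).mp hin⟩
  · rintro ⟨kw, hmem, hinf⟩
    exact ⟨kw, h2 _ hmem rfl, (PySem.Str.isIn_iff_infix kw g).mpr hinf⟩

theorem matched_bounds {j : Int} {g : String} (h : pvMatched j g) : 0 ≤ j ∧ j ≤ 6 := by
  obtain ⟨kw, hmem, -⟩ := h
  have := pairs_facts _ hmem
  exact ⟨this.2.2.2.1, this.2.2.2.2⟩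

theorem min_vals_eq (g : String) (k : Int) (hk : pvMatched k g)
    (hlo : ∀ j, pvMatched j g → k ≤ j) :
    ((pvCands g).filterMap id).min? = some k := by
  rw [List.min?_eq_some_iff]
  exact ⟨(mem_vals_iff g k).mpr hk, fun b hb => hlo b ((mem_vals_iff g b).mp hb)⟩

theorem vals_nil (g : String) (h : ∀ j, ¬ pvMatched j g) :
    ((pvCands g).filterMap id).min? = none := by
  rw [List.min?_eq_none_iff, List.eq_nil_iff_forall_not_mem]
  intro x hx
  exact h x ((mem_vals_iff g x).mp hx)

theorem g0_iff (g : String) :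
    ((["count", "number", "math", "addition", "subtraction", "arithmetic"] : List String).any (fun k => PySem.Str.isIn k g) = true) ↔ pvMatched 0 g :=
  group_iff g _ 0 (by decide) (by decide)

theorem g1_iff (g : String) :
    ((["vocab", "word", "spelling", "language", "letters"] : List String).any (fun k => PySem.Str.isIn k g) = true) ↔ pvMatched 1 g :=
  group_iff g _ 1 (by decide) (by decide)

theorem g2_iff (g : String) :
    ((["science", "nature", "biology", "physics", "chemistry", "planet", "animal"] : List String).any (fun k => PySem.Str.isIn k g) = true) ↔ pvMatched 2 g :=
  group_iff g _ 2 (by decide) (by decide)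

theorem g3_iff (g : String) :
    ((["geo", "country", "continent", "map", "capital", "place"] : List String).any (fun k => PySem.Str.isIn k g) = true) ↔ pvMatched 3 g :=
  group_iff g _ 3 (by decide) (by decide)

theorem g4_iff (g : String) :
    ((["read", "comprehension", "story", "sentence", "paragraph"] : List String).any (fun k => PySem.Str.isIn k g) = true) ↔ pvMatched 4 g :=
  group_iff g _ 4 (by decide) (by decide)

theorem g5_iff (g : String) :
    ((["color", "colour", "shape", "pattern", "size"] : List String).any (fun k => PySem.Str.isIn k g) = true) ↔ pvMatched 5 g :=
  group_iff g _ 5 (by decide) (by decide)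

theorem g6_iff (g : String) :
    ((["emotion", "feeling", "social", "friend", "kind", "share", "team"] : List String).any (fun k => PySem.Str.isIn k g) = true) ↔ pvMatched 6 g :=
  group_iff g _ 6 (by decide) (by decide)

-- B's nested scan fold computes the minimum candidate group index
set_option maxRecDepth 8192 in
theorem pv_scan (g : String) :
    ((PySem.List.pyRange 0 (PySem.Str.len g) 1).foldl
      (fun best i =>
        kwLengths.foldl
          (fun best L =>
            match kwIndex.get? (PySem.Str.slice g (some i) (some (i + L))), best with
            | some j, none => some j
            | some j, some b => if j < b then some j else some b
            | none, _ => best)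
          best)
      none) = ((pvCands g).filterMap id).min? := by
  show ((PySem.List.pyRange 0 (PySem.Str.len g) 1).foldl
      (fun best i => kwLengths.foldl (fun best L => pvStep best (pvLookup g i L)) best) none) = _
  simp only [pvStep_eq_omin]
  simp only [← List.foldl_map]
  rw [← List.foldl_flatten, foldl_pvOmin]
  rfl

-- the central lemma: A's cascade equals B's scan on every input
theorem pv_core (s : String) :
    learning_goal_guidance_py s = learning_goal_guidance_py_alt s := by
  simp only [learning_goal_guidance_py, learning_goal_guidance_py_alt]
  generalize PySem.Str.strip (PySem.Str.lower s) = g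
  rw [pv_scan]
  by_cases h0 : ((["count", "number", "math", "addition", "subtraction", "arithmetic"] : List String).any (fun k => PySem.Str.isIn k g) = true)
  · rw [if_pos h0, min_vals_eq g 0 ((g0_iff g).mp h0) (fun j hj => (matched_bounds hj).1)]
    rfl
  · rw [if_neg h0]
    have n0 : ¬ pvMatched 0 g := fun h => h0 ((g0_iff g).mpr h)
    by_cases h1 : ((["vocab", "word", "spelling", "language", "letters"] : List String).any (fun k => PySem.Str.isIn k g) = true)
    · rw [if_pos h1, min_vals_eq g 1 ((g1_iff g).mp h1) ?lo]
      case lo =>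
        intro j hj
        have hb := matched_bounds hj
        have ne0 : j ≠ 0 := fun e => n0 (e ▸ hj)
        omega
      rfl
    · rw [if_neg h1]
      have n1 : ¬ pvMatched 1 g := fun h => h1 ((g1_iff g).mpr h)
      by_cases h2 : ((["science", "nature", "biology", "physics", "chemistry", "planet", "animal"] : List String).any (fun k => PySem.Str.isIn k g) = true)
      · rw [if_pos h2, min_vals_eq g 2 ((g2_iff g).mp h2) ?lo]
        case lo =>
          intro j hj
          have hb := matched_bounds hj
          have ne0 : j ≠ 0 := fun e => n0 (e ▸ hj)
          have ne1 : j ≠ 1 := fun e => n1 (e ▸ hj)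
          omega
        rfl
      · rw [if_neg h2]
        have n2 : ¬ pvMatched 2 g := fun h => h2 ((g2_iff g).mpr h)
        by_cases h3 : ((["geo", "country", "continent", "map", "capital", "place"] : List String).any (fun k => PySem.Str.isIn k g) = true)
        · rw [if_pos h3, min_vals_eq g 3 ((g3_iff g).mp h3) ?lo]
          case lo =>
            intro j hj
            have hb := matched_bounds hj
            have ne0 : j ≠ 0 := fun e => n0 (e ▸ hj)
            have ne1 : j ≠ 1 := fun e => n1 (e ▸ hj)
            have ne2 : j ≠ 2 := fun e => n2 (e ▸ hj)
            omega
          rfl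
        · rw [if_neg h3]
          have n3 : ¬ pvMatched 3 g := fun h => h3 ((g3_iff g).mpr h)
          by_cases h4 : ((["read", "comprehension", "story", "sentence", "paragraph"] : List String).any (fun k => PySem.Str.isIn k g) = true)
          · rw [if_pos h4, min_vals_eq g 4 ((g4_iff g).mp h4) ?lo]
            case lo =>
              intro j hj
              have hb := matched_bounds hj
              have ne0 : j ≠ 0 := fun e => n0 (e ▸ hj)
              have ne1 : j ≠ 1 := fun e => n1 (e ▸ hj)
              have ne2 : j ≠ 2 := fun e => n2 (e ▸ hj)
              have ne3 : j ≠ 3 := fun e => n3 (e ▸ hj)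
              omega
            rfl
          · rw [if_neg h4]
            have n4 : ¬ pvMatched 4 g := fun h => h4 ((g4_iff g).mpr h)
            by_cases h5 : ((["color", "colour", "shape", "pattern", "size"] : List String).any (fun k => PySem.Str.isIn k g) = true)
            · rw [if_pos h5, min_vals_eq g 5 ((g5_iff g).mp h5) ?lo]
              case lo =>
                intro j hj
                have hb := matched_bounds hj
                have ne0 : j ≠ 0 := fun e => n0 (e ▸ hj)
                have ne1 : j ≠ 1 := fun e => n1 (e ▸ hj)
                have ne2 : j ≠ 2 := fun e => n2 (e ▸ hj)
                have ne3 : j ≠ 3 := fun e => n3 (e ▸ hj)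
                have ne4 : j ≠ 4 := fun e => n4 (e ▸ hj)
                omega
              rfl
            · rw [if_neg h5]
              have n5 : ¬ pvMatched 5 g := fun h => h5 ((g5_iff g).mpr h)
              by_cases h6 : ((["emotion", "feeling", "social", "friend", "kind", "share", "team"] : List String).any (fun k => PySem.Str.isIn k g) = true)
              · rw [if_pos h6, min_vals_eq g 6 ((g6_iff g).mp h6) ?lo]
                case lo =>
                  intro j hj
                  have hb := matched_bounds hj
                  have ne0 : j ≠ 0 := fun e => n0 (e ▸ hj)
                  have ne1 : j ≠ 1 := fun e => n1 (e ▸ hj)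
                  have ne2 : j ≠ 2 := fun e => n2 (e ▸ hj)
                  have ne3 : j ≠ 3 := fun e => n3 (e ▸ hj)
                  have ne4 : j ≠ 4 := fun e => n4 (e ▸ hj)
                  have ne5 : j ≠ 5 := fun e => n5 (e ▸ hj)
                  omega
                rfl
              · rw [if_neg h6]
                have n6 : ¬ pvMatched 6 g := fun h => h6 ((g6_iff g).mpr h)
                rw [vals_nil g ?nm]
                case nm =>
                  intro j hj
                  have hb := matched_bounds hj
                  have ne0 : j ≠ 0 := fun e => n0 (e ▸ hj)
                  have ne1 : j ≠ 1 := fun e => n1 (e ▸ hj)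
                  have ne2 : j ≠ 2 := fun e => n2 (e ▸ hj)
                  have ne3 : j ≠ 3 := fun e => n3 (e ▸ hj)
                  have ne4 : j ≠ 4 := fun e => n4 (e ▸ hj)
                  have ne5 : j ≠ 5 := fun e => n5 (e ▸ hj)
                  have ne6 : j ≠ 6 := fun e => n6 (e ▸ hj)
                  omega

-- ===== VERDICT (by name: the statement is the Claim_ definition above) =====
theorem learning_goal_guidance_py_spec : Claim_equal_learning_goal_guidance_py := by
  intro s _
  unfold Spec_learning_goal_guidance_py
  exact pv_core s
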